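-- pv_equiv track=rewrite | github.com/zenzenzencoding/basic_python | final_test/ResultB/10141530420/10141530420-赵子朋-编程.py | drawPoint
-- ===== SOURCE A (Python) =====
-- def drawPoint(start,end):
--     s=''
--     for i in range(10):
--         if start==i:
--             s+='*'
--         elif end==i:
--             s+='*'
--         else:
--             s+=' '
--     return(s)
-- ===== SOURCE B (Python) =====
-- def drawPoint(start, end):
--     buf = [' '] * 10
--     if 0 <= start < 10:
--         buf[start] = '*'
--     if 0 <= end < 10:
--         buf[end] = '*'
--     return ''.join(buf)
-- ===== Notes on version B (the rewrite author's own statement) =====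
-- stated objective: simpler
-- what changed: Replaces the scan of all 10 slots with equality tests per slot by a mutable 10-space buffer with two guarded direct index writes.
import Mathlib
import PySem

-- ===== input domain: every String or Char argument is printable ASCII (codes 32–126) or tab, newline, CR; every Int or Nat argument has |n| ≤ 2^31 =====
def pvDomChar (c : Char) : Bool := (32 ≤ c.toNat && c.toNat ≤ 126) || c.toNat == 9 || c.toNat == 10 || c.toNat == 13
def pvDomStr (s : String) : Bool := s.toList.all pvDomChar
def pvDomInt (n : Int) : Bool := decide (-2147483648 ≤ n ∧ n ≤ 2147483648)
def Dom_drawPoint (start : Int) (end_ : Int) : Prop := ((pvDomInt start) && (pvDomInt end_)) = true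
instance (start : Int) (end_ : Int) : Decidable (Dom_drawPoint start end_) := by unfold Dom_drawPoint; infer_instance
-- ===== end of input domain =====

-- B replaces A's scan of all 10 slots (two equality tests per slot) by a 10-space buffer
-- with two guarded direct index writes; objective: simpler.

-- ===== PORT A =====
-- s = ''; for i in range(10): append '*' / '*' / ' ' by the branch that fires
def drawPoint (start : Int) (end_ : Int) : String :=
  (PySem.List.pyRange 0 10 1).foldl
    (fun s i =>
      if start = i then s.push '*'
      else if end_ = i then s.push '*'
      else s.push ' ')
    ""

-- ===== PORT B =====
-- buf = [' ']*10; guarded buf[start]='*'; guarded buf[end]='*'; ''.join(buf)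
def drawPoint_alt (start : Int) (end_ : Int) : String :=
  let buf := List.replicate 10 ' '
  let buf := if 0 ≤ start ∧ start < 10 then buf.set start.toNat '*' else buf
  let buf := if 0 ≤ end_ ∧ end_ < 10 then buf.set end_.toNat '*' else buf
  String.ofList buf

-- ===== PRECONDITION & SPEC =====
def Spec_drawPoint (start : Int) (end_ : Int) (out : String) : Prop := out = drawPoint_alt start end_
instance (start : Int) (end_ : Int) (out : String) : Decidable (Spec_drawPoint start end_ out) := by unfold Spec_drawPoint; infer_instance

-- ===== CLAIM (what is proved, stated in full; the proofs are below) =====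
def Claim_equal_drawPoint : Prop := ∀ (start : Int) (end_ : Int), Dom_drawPoint start end_ → Spec_drawPoint start end_ (drawPoint start end_)

-- ===== LEMMAS AND PROOFS =====

-- A's loop appends, per index, the character chosen by the two equality tests.
lemma foldA_chars (s e : Int) (l : List Int) (acc : String) :
    (l.foldl
      (fun st i =>
        if s = i then st.push '*'
        else if e = i then st.push '*'
        else st.push ' ')
      acc).toList
    = acc.toList ++ l.map (fun i => if s = i ∨ e = i then '*' else ' ') := by
  induction l generalizing acc with
  | nil => simp
  | cons a t ih =>
    simp only [List.foldl, List.map]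
    by_cases h1 : s = a
    · rw [if_pos h1, if_pos (Or.inl h1), ih]; simp
    · by_cases h2 : e = a
      · rw [if_neg h1, if_pos h2, if_pos (Or.inr h2), ih]; simp
      · rw [if_neg h1, if_neg h2, if_neg (by tauto), ih]; simp

lemma A_chars (s e : Int) :
    (drawPoint s e).toList
    = (List.range 10).map (fun (i : Nat) => if s = (i : Int) ∨ e = (i : Int) then '*' else ' ') := by
  have hr : PySem.List.pyRange 0 10 1 = (List.range 10).map (fun i => (i : Int)) := by decide
  rw [drawPoint, foldA_chars, hr, List.map_map]
  rfl

lemma B_chars (s e : Int) :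
    (drawPoint_alt s e).toList
    = (List.range 10).map (fun (i : Nat) => if s = (i : Int) ∨ e = (i : Int) then '*' else ' ') := by
  have hA : (drawPoint_alt s e).toList =
      (if 0 ≤ e ∧ e < 10 then
        (if 0 ≤ s ∧ s < 10 then (List.replicate 10 ' ').set s.toNat '*'
         else List.replicate 10 ' ').set e.toNat '*'
       else
        (if 0 ≤ s ∧ s < 10 then (List.replicate 10 ' ').set s.toNat '*'
         else List.replicate 10 ' ')) := by
    simp [drawPoint_alt]
  rw [hA]
  by_cases h1 : 0 ≤ s ∧ s < 10 <;> by_cases h2 : 0 ≤ e ∧ e < 10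
  · rw [if_pos h2, if_pos h1]
    apply List.ext_getElem
    · simp
    · intro i hi hi'
      simp only [List.length_map, List.length_range] at hi'
      rw [List.getElem_map, List.getElem_range]
      try simp only [List.getElem_set, List.getElem_replicate]
      split_ifs <;> first | rfl | (exfalso; omega)
  · rw [if_neg h2, if_pos h1]
    apply List.ext_getElem
    · simp
    · intro i hi hi'
      simp only [List.length_map, List.length_range] at hi'
      rw [List.getElem_map, List.getElem_range]
      try simp only [List.getElem_set, List.getElem_replicate]
      split_ifs <;> first | rfl | (exfalso; omega)
  · rw [if_pos h2, if_neg h1]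
    apply List.ext_getElem
    · simp
    · intro i hi hi'
      simp only [List.length_map, List.length_range] at hi'
      rw [List.getElem_map, List.getElem_range]
      try simp only [List.getElem_set, List.getElem_replicate]
      split_ifs <;> first | rfl | (exfalso; omega)
  · rw [if_neg h2, if_neg h1]
    apply List.ext_getElem
    · simp
    · intro i hi hi'
      simp only [List.length_map, List.length_range] at hi'
      rw [List.getElem_map, List.getElem_range]
      try simp only [List.getElem_replicate]
      split_ifs <;> first | rfl | (exfalso; omega)
theorem drawPoint_eq (s e : Int) : drawPoint s e = drawPoint_alt s e := by
  have h := (A_chars s e).trans (B_chars s e).symm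
  calc drawPoint s e = String.ofList (drawPoint s e).toList := by simp
    _ = String.ofList (drawPoint_alt s e).toList := by rw [h]
    _ = drawPoint_alt s e := by simp

-- ===== VERDICT (by name: the statement is the Claim_ definition above) =====
theorem drawPoint_spec : Claim_equal_drawPoint := by
  intro s e _
  exact drawPoint_eq s e
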